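-- pv_equiv track=rewrite | github.com/akashdeep3194/Scaler | d46/Maximum & Minimum Magic.py | solve
-- ===== SOURCE A (Python) =====
-- def solve(A):
--     A = sorted(A)
--     magicmn = magicmx = 0
--     i = 0
--     j = 0
--     while i < len(A)-1:
--         magicmn = (magicmn + abs(A[i]-A[i+1])) % (10**9+7)
--         magicmx = (magicmx + abs(A[j]-A[len(A)-1-j])) % (10**9+7)
--         i += 2
--         j += 1
--     return [magicmx, magicmn]
-- ===== SOURCE B (Python) =====
-- def solve(A):
--     S = sorted(A)
--     n = len(S)
--     half = n // 2
--     M = 10 ** 9 + 7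
--     mx = mn = 0
--     for idx, x in enumerate(S):
--         if idx < half:
--             mx -= x
--         elif idx >= n - half:
--             mx += x
--         if idx < 2 * half:
--             mn += x if idx % 2 == 1 else -x
--     return [mx % M, mn % M]
-- ===== Notes on version B (the rewrite author's own statement) =====
-- stated objective: alternative
-- what changed: Instead of pairing elements by index arithmetic (i,i+1 and j,n-1-j) with an abs and a modulo per step, B makes one enumerate pass over the sorted array assigning each element a signed coefficient (-1/+1/0 per half for magicmx, alternating sign on the first 2*(n//2) elements for magicmn) and takes the modulus once at the end, exact since both totals are non-negative.
import Mathlib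
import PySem

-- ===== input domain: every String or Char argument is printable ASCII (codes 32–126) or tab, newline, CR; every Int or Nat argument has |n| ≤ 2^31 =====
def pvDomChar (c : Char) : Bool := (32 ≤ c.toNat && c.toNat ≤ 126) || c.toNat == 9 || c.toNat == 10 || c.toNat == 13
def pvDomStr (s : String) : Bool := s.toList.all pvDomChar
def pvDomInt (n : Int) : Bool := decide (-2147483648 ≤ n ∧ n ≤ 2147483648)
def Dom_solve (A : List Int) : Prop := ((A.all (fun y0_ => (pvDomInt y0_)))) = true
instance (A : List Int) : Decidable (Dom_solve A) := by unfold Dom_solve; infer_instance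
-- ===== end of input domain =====

-- B replaces A's index-paired while loop (terms A[i+1]-A[i] and A[n-1-j]-A[j], abs and mod
-- per step) by a single enumerate pass giving each element of the sorted array a signed
-- coefficient, with one modulo at the end; objective: alternative.

-- ===== PORT A =====
-- A's while loop: state (magicmn, magicmx, i, j); returns (magicmx, magicmn)
def solveLoop (S : List Int) (mn mx : Int) (i j : Nat) : Int × Int :=
  if h : (i : Int) < (S.length : Int) - 1 then
    solveLoop S
      (PySem.Int.mod (mn + |PySem.List.pyGetD S (i : Int) 0 - PySem.List.pyGetD S ((i : Int) + 1) 0|) (10 ^ 9 + 7))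
      (PySem.Int.mod (mx + |PySem.List.pyGetD S (j : Int) 0 - PySem.List.pyGetD S ((S.length : Int) - 1 - (j : Int)) 0|) (10 ^ 9 + 7))
      (i + 2) (j + 1)
  else (mx, mn)
termination_by S.length - i
decreasing_by omega

def solve (A : List Int) : List Int :=
  let S := PySem.List.sorted A (fun x => x) false
  let r := solveLoop S 0 0 0 0
  [r.1, r.2]

-- ===== PORT B =====
def solve_alt (A : List Int) : List Int :=
  let S := PySem.List.sorted A (fun x => x) false
  let n := S.length
  let half := n / 2
  let st := (PySem.List.enumerate S 0).foldl
    (fun (st : Int × Int) (p : Int × Int) =>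
      let mx := if p.1 < (half : Int) then st.1 - p.2
        else if ((n : Int) - (half : Int)) ≤ p.1 then st.1 + p.2 else st.1
      let mn := if p.1 < 2 * (half : Int) then
          (if PySem.Int.mod p.1 2 == 1 then st.2 + p.2 else st.2 - p.2)
        else st.2
      (mx, mn))
    (0, 0)
  [PySem.Int.mod st.1 (10 ^ 9 + 7), PySem.Int.mod st.2 (10 ^ 9 + 7)]

-- ===== PRECONDITION & SPEC =====
def Spec_solve (A : List Int) (out : List Int) : Prop := out = solve_alt A
instance (A : List Int) (out : List Int) : Decidable (Spec_solve A out) := by unfold Spec_solve; infer_instance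

-- ===== CLAIM (what is proved, stated in full; the proofs are below) =====
def Claim_equal_solve : Prop := ∀ (A : List Int), Dom_solve A → Spec_solve A (solve A)

-- ===== LEMMAS AND PROOFS =====

/-- term added to magicmx at iteration `t` (sorted list, abs removed) -/
def eTerm (S : List Int) (t : Nat) : Int := S.getD (S.length - 1 - t) 0 - S.getD t 0
/-- term added to magicmn at iteration `t` (sorted list, abs removed) -/
def dTerm (S : List Int) (t : Nat) : Int := S.getD (2 * t + 1) 0 - S.getD (2 * t) 0

/-- B's signed coefficient for magicmx -/
def cMX (n half : Nat) (i x : Int) : Int :=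
  if i < (half : Int) then -x else if ((n : Int) - (half : Int)) ≤ i then x else 0
/-- B's signed coefficient for magicmn -/
def cMN (half : Nat) (i x : Int) : Int :=
  if i < 2 * (half : Int) then (if PySem.Int.mod i 2 == 1 then x else -x) else 0

lemma getD_mono (S : List Int) (hS : S.Pairwise (· ≤ ·)) {i j : Nat}
    (hij : i ≤ j) (hj : j < S.length) : S.getD i 0 ≤ S.getD j 0 := by
  rcases Nat.lt_or_ge i j with h | h
  · have := (List.pairwise_iff_getElem.mp hS) i j (by omega) hj h
    rw [List.getD_eq_getElem S 0 (by omega), List.getD_eq_getElem S 0 hj]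
    exact this
  · have : i = j := by omega
    simp [this]

lemma modAdd (a b m : Int) : (a % m + b) % m = (a + b) % m := by
  rw [Int.add_emod (a % m) b, Int.emod_emod_of_dvd a dvd_rfl, ← Int.add_emod]

/-- main loop characterisation: `c + 1` remaining iterations -/
lemma loop_eq (S : List Int) (hS : S.Pairwise (· ≤ ·)) :
    ∀ (c t : Nat) (mn mx : Int), t + c + 1 = S.length / 2 →
      solveLoop S mn mx (2 * t) t =
        (PySem.Int.mod (mx + ∑ u ∈ Finset.range (c + 1), eTerm S (t + u)) (10 ^ 9 + 7),
         PySem.Int.mod (mn + ∑ u ∈ Finset.range (c + 1), dTerm S (t + u)) (10 ^ 9 + 7)) := by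
  intro c
  induction c with
  | zero =>
      intro t mn mx ht
      rw [solveLoop, dif_pos (by omega : ((2*t : Nat) : Int) < (S.length : Int) - 1)]
      rw [solveLoop, dif_neg (by omega : ¬ ((2*t+2 : Nat) : Int) < (S.length : Int) - 1)]
      have e1 : ((2*t : Nat) : Int) + 1 = ((2*t+1 : Nat) : Int) := by push_cast; ring
      have e2 : (S.length : Int) - 1 - (t : Int) = ((S.length - 1 - t : Nat) : Int) := by omega
      rw [e1, e2]
      simp only [PySem.List.pyGetD_natCast]
      have habs1 : |S.getD (2*t) 0 - S.getD (2*t+1) 0| = dTerm S t := by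
        rw [abs_sub_comm, abs_of_nonneg (sub_nonneg.2 (getD_mono S hS (by omega) (by omega)))]
        rfl
      have habs2 : |S.getD t 0 - S.getD (S.length - 1 - t) 0| = eTerm S t := by
        rw [abs_sub_comm, abs_of_nonneg (sub_nonneg.2 (getD_mono S hS (by omega) (by omega)))]
        rfl
      rw [habs1, habs2]
      simp
  | succ c ih =>
      intro t mn mx ht
      rw [solveLoop, dif_pos (by omega : ((2*t : Nat) : Int) < (S.length : Int) - 1)]
      have e1 : ((2*t : Nat) : Int) + 1 = ((2*t+1 : Nat) : Int) := by push_cast; ring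
      have e2 : (S.length : Int) - 1 - (t : Int) = ((S.length - 1 - t : Nat) : Int) := by omega
      rw [e1, e2]
      simp only [PySem.List.pyGetD_natCast]
      have habs1 : |S.getD (2*t) 0 - S.getD (2*t+1) 0| = dTerm S t := by
        rw [abs_sub_comm, abs_of_nonneg (sub_nonneg.2 (getD_mono S hS (by omega) (by omega)))]
        rfl
      have habs2 : |S.getD t 0 - S.getD (S.length - 1 - t) 0| = eTerm S t := by
        rw [abs_sub_comm, abs_of_nonneg (sub_nonneg.2 (getD_mono S hS (by omega) (by omega)))]
        rfl
      rw [habs1, habs2]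
      have h22 : 2*t + 2 = 2*(t+1) := by ring
      rw [h22, ih (t+1) _ _ (by omega)]
      have hM : (0:Int) < 10 ^ 9 + 7 := by norm_num
      simp only [PySem.Int.mod_eq_emod_of_pos hM, modAdd]
      have hsh : ∀ u, t + 1 + u = t + (u + 1) := by omega
      rw [Finset.sum_range_succ' (fun u => eTerm S (t+u)) (c+1),
          Finset.sum_range_succ' (fun u => dTerm S (t+u)) (c+1)]
      simp only [hsh, Nat.add_zero]
      ring_nf

lemma listSum_range (f : Nat → Int) (m : Nat) :
    ((List.range m).map f).sum = ∑ u ∈ Finset.range m, f u := by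
  induction m with
  | zero => simp
  | succ m ih => simp [List.range_succ, Finset.sum_range_succ, ih]

/-- a fold that only adds per-component equals the two mapped sums -/
lemma foldl_add2 (l : List (Int × Int)) (f g : Int → Int → Int) (a b : Int) :
    l.foldl (fun st p => (st.1 + f p.1 p.2, st.2 + g p.1 p.2)) (a, b)
      = (a + (l.map (fun p => f p.1 p.2)).sum, b + (l.map (fun p => g p.1 p.2)).sum) := by
  induction l generalizing a b with
  | nil => simp
  | cons p l ih => simp [ih]; constructor <;> ring

lemma body_eq (n half : Nat) :
    (fun (st : Int × Int) (p : Int × Int) =>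
      let mx := if p.1 < (half : Int) then st.1 - p.2
        else if ((n : Int) - (half : Int)) ≤ p.1 then st.1 + p.2 else st.1
      let mn := if p.1 < 2 * (half : Int) then
          (if PySem.Int.mod p.1 2 == 1 then st.2 + p.2 else st.2 - p.2)
        else st.2
      (mx, mn))
    = fun st p => (st.1 + cMX n half p.1 p.2, st.2 + cMN half p.1 p.2) := by
  funext st p
  simp only [cMX, cMN]
  split_ifs <;> simp only [Prod.mk.injEq] <;> constructor <;> first | rfl | trivial | ring

/-- enumerate-map-sum as a Finset sum over indices -/
lemma map_enum_sum (S : List Int) (f : Int → Int → Int) :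
    ((PySem.List.enumerate S 0).map (fun p => f p.1 p.2)).sum
      = ∑ k ∈ Finset.range S.length, f (k : Int) (S.getD k 0) := by
  rw [PySem.List.enumerate_eq_map_pyRange S 0, List.map_map]
  rw [show PySem.List.len S = (S.length : Int) from rfl, PySem.List.pyRange_one, List.map_map]
  rw [show ((S.length : Int) - 0).toNat = S.length from by omega]
  rw [listSum_range]
  refine Finset.sum_congr rfl (fun k hk => ?_)
  simp [PySem.List.pyGetD_natCast]

/-- sum of an upper-tail indicator -/
lemma sum_tail (h : Nat → Int) (m q : Nat) :
    ∑ k ∈ Finset.range (m + q), (if m ≤ k then h k else 0)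
      = ∑ j ∈ Finset.range q, h (m + j) := by
  rw [Finset.sum_range_add]
  have h0 : ∑ k ∈ Finset.range m, (if m ≤ k then h k else 0) = 0 := by
    refine Finset.sum_eq_zero (fun k hk => if_neg ?_)
    have := Finset.mem_range.mp hk; omega
  rw [h0, zero_add]
  exact Finset.sum_congr rfl (fun j _ => if_pos (by omega))

/-- the magicmx coefficient sum equals the mirror-pair sum -/
lemma sumMX (S : List Int) :
    ∑ k ∈ Finset.range S.length, cMX S.length (S.length / 2) (k : Int) (S.getD k 0)
      = ∑ u ∈ Finset.range (S.length / 2), eTerm S u := by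
  have hsplit : ∀ k ∈ Finset.range S.length,
      cMX S.length (S.length / 2) (k : Int) (S.getD k 0)
        = (if S.length - S.length / 2 ≤ k then S.getD k 0 else 0)
            - (if k < S.length / 2 then S.getD k 0 else 0) := by
    intro k hk
    have hk' : k < S.length := Finset.mem_range.mp hk
    unfold cMX
    split_ifs <;> omega
  rw [Finset.sum_congr rfl hsplit, Finset.sum_sub_distrib]
  have hsub : Finset.range (S.length / 2) ⊆ Finset.range S.length :=
    by intro x hx; simp only [Finset.mem_range] at *; omega
  have hlow : ∑ k ∈ Finset.range S.length, (if k < S.length / 2 then S.getD k 0 else 0)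
      = ∑ k ∈ Finset.range (S.length / 2), S.getD k 0 := by
    rw [← Finset.sum_subset hsub (fun x _ hx => if_neg (by simpa using hx))]
    exact Finset.sum_congr rfl (fun k hk => if_pos (Finset.mem_range.mp hk))
  have hhigh : ∑ k ∈ Finset.range S.length, (if S.length - S.length / 2 ≤ k then S.getD k 0 else 0)
      = ∑ j ∈ Finset.range (S.length / 2), S.getD (S.length - S.length / 2 + j) 0 := by
    have ht := sum_tail (fun k => S.getD k 0) (S.length - S.length / 2) (S.length / 2)
    rw [show (S.length - S.length / 2) + S.length / 2 = S.length from by omega] at ht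
    exact ht
  rw [hlow, hhigh]
  unfold eTerm
  rw [Finset.sum_sub_distrib]
  congr 1
  rw [← Finset.sum_range_reflect (fun j => S.getD (S.length - S.length / 2 + j) 0) (S.length / 2)]
  refine Finset.sum_congr rfl (fun u hu => ?_)
  have hu' : u < S.length / 2 := Finset.mem_range.mp hu
  congr 1
  omega

/-- the alternating-sign sum over the first 2m elements is the adjacent-gap sum -/
lemma sumAlt (S : List Int) (m : Nat) :
    ∑ k ∈ Finset.range (2 * m), (if k % 2 = 1 then S.getD k 0 else -S.getD k 0)
      = ∑ u ∈ Finset.range m, dTerm S u := by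
  induction m with
  | zero => simp
  | succ m ih =>
      have h2 : 2 * (m + 1) = (2 * m + 1) + 1 := by ring
      rw [h2, Finset.sum_range_succ, Finset.sum_range_succ, Finset.sum_range_succ, ih]
      rw [if_neg (show ¬ (2 * m) % 2 = 1 from by omega),
          if_pos (show (2 * m + 1) % 2 = 1 from by omega)]
      unfold dTerm
      ring

lemma sumMN (S : List Int) :
    ∑ k ∈ Finset.range S.length, cMN (S.length / 2) (k : Int) (S.getD k 0)
      = ∑ u ∈ Finset.range (S.length / 2), dTerm S u := by
  have hsub : Finset.range (2 * (S.length / 2)) ⊆ Finset.range S.length :=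
    by intro x hx; simp only [Finset.mem_range] at *; omega
  have hres : ∑ k ∈ Finset.range S.length, cMN (S.length / 2) (k : Int) (S.getD k 0)
      = ∑ k ∈ Finset.range (2 * (S.length / 2)), cMN (S.length / 2) (k : Int) (S.getD k 0) := by
    rw [← Finset.sum_subset hsub (fun x _ hx => ?_)]
    have hx' : ¬ x < 2 * (S.length / 2) := by simpa using hx
    unfold cMN
    rw [if_neg (by push_cast; omega)]
  rw [hres, ← sumAlt S (S.length / 2)]
  refine Finset.sum_congr rfl (fun k hk => ?_)
  have hk' : k < 2 * (S.length / 2) := Finset.mem_range.mp hk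
  unfold cMN
  rw [if_pos (by push_cast; omega)]
  have hmod : PySem.Int.mod (k : Int) 2 = ((k % 2 : Nat) : Int) := by
    rw [PySem.Int.mod_eq_emod_of_pos (by norm_num)]
    push_cast
    omega
  rw [hmod]
  by_cases hpar : k % 2 = 1
  · simp [hpar]
  · have h0 : k % 2 = 0 := by omega
    simp [h0]

/-- A's result as the two pair sums -/
lemma solve_eq_sums (S : List Int) (hS : S.Pairwise (· ≤ ·)) :
    solveLoop S 0 0 0 0
      = (PySem.Int.mod (∑ u ∈ Finset.range (S.length / 2), eTerm S u) (10 ^ 9 + 7),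
         PySem.Int.mod (∑ u ∈ Finset.range (S.length / 2), dTerm S u) (10 ^ 9 + 7)) := by
  by_cases hn : S.length ≤ 1
  · rw [solveLoop, dif_neg (by omega : ¬ ((0:Nat) : Int) < (S.length : Int) - 1)]
    rw [show S.length / 2 = 0 from by omega]
    rw [PySem.Int.mod_eq_emod_of_pos (by norm_num : (0:Int) < 10 ^ 9 + 7)]
    simp
  · have hloop := loop_eq S hS (S.length / 2 - 1) 0 0 0 (by omega)
    rw [(by omega : 2 * 0 = 0)] at hloop
    rw [(by omega : S.length / 2 - 1 + 1 = S.length / 2)] at hloop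
    rw [hloop]
    simp

theorem solve_eq_alt : ∀ (A : List Int), solve A = solve_alt A := by
  intro A
  have hS : (PySem.List.sorted A (fun x => x) false).Pairwise (· ≤ ·) := by
    simpa using PySem.List.sorted_pairwise A (fun x => x)
  simp only [solve, solve_alt]
  rw [body_eq, foldl_add2, map_enum_sum, map_enum_sum, sumMX, sumMN, zero_add, zero_add]
  rw [solve_eq_sums _ hS]

-- ===== VERDICT (by name: the statement is the Claim_ definition above) =====
theorem solve_spec : Claim_equal_solve := by
  intro A _
  unfold Spec_solve
  exact solve_eq_alt A
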